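-- pv_equiv track=rewrite | github.com/Erotemic/ubelt | ubelt/util_list.py | replicate
-- ===== SOURCE A (Python) =====
-- from itertools import zip_longest
--
-- def replicate(items, chunksize):
--     sentinel = object()
--     copied_iters = [iter(items)] * chunksize
--     # Fill empty space in the last chunk by replicating the last value
--     chunks_with_sentinals = zip_longest(*copied_iters, fillvalue=sentinel)
--     for chunk in chunks_with_sentinals:
--         filt_chunk = [item for item in chunk if item is not sentinel]
--         if len(filt_chunk) == chunksize:
--             yield filt_chunk
--         else:
--             sizediff = (chunksize - len(filt_chunk))
--             padded_chunk = filt_chunk + [filt_chunk[-1]] * sizediff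
--             yield padded_chunk
-- ===== SOURCE B (Python) =====
-- def replicate(items, chunksize):
--     if chunksize < 1:
--         return
--     buffer = []
--     for item in items:
--         buffer.append(item)
--         if len(buffer) == chunksize:
--             yield buffer
--             buffer = []
--     if buffer:
--         yield buffer + [buffer[-1]] * (chunksize - len(buffer))
-- ===== Notes on version B (the rewrite author's own statement) =====
-- stated objective: simpler
-- what changed: Replaces the zip_longest-over-duplicated-iterator grouper with sentinel filtering by a plain single-pass accumulator buffer that is flushed at chunksize and padded once at the end.
import Mathlib
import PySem

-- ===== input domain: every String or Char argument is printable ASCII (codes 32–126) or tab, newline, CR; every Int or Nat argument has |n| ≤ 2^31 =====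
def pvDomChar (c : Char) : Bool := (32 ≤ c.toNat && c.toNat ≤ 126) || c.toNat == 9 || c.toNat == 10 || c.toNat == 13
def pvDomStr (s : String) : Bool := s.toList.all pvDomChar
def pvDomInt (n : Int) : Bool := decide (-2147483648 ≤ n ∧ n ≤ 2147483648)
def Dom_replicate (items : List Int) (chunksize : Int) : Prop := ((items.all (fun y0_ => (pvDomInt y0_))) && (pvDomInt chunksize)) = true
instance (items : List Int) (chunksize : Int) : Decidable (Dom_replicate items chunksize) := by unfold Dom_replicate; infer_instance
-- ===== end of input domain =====

-- B replaces A's zip_longest-over-a-duplicated-iterator grouper with a plain buffered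
-- single pass (objective: simpler). Equivalence of the generators' yielded sequences
-- (as lists) is proved; neither version mutates its arguments.

-- ===== PORT A =====
-- A's zip_longest over chunksize copies of one iterator yields, for positive chunksize,
-- the successive blocks items[0:c], items[c:2c], …, stopping when the iterator is empty;
-- the sentinel filter makes each yielded chunk exactly such a (possibly short, nonempty)
-- block.  goA m ports that chunk stream for chunksize = m+1; chunk[-1] on the nonempty
-- chunk is getLast!.
def goA (m : Nat) : List Int → List (List Int)
  | [] => []
  | x :: xs =>
    let chunk := (x :: xs).take (m + 1)
    let rest := (x :: xs).drop (m + 1)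
    (if chunk.length = m + 1 then chunk
     else chunk ++ List.replicate (m + 1 - chunk.length) chunk.getLast!) :: goA m rest
termination_by l => l.length
decreasing_by simp only [List.length_drop, List.length_cons]; omega

def replicate (items : List Int) (chunksize : Int) : List (List Int) :=
  -- [iter(items)] * chunksize is empty iff chunksize ≤ 0, and then zip_longest yields nothing
  if chunksize ≤ 0 then [] else goA (chunksize.toNat - 1) items

-- ===== PORT B =====
-- buffered single pass: append, flush when the buffer reaches chunksize, pad the remainder
def loopB (n : Nat) (items buf : List Int) : List (List Int) :=
  match items with
  | [] =>
    if buf = [] then []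
    else [buf ++ List.replicate (n - buf.length) buf.getLast!]
  | x :: xs =>
    let buf' := buf ++ [x]
    if buf'.length = n then buf' :: loopB n xs [] else loopB n xs buf'

def replicate_alt (items : List Int) (chunksize : Int) : List (List Int) :=
  if chunksize < 1 then [] else loopB chunksize.toNat items []

-- ===== PRECONDITION & SPEC =====
def Spec_replicate (items : List Int) (chunksize : Int) (out : List (List Int)) : Prop := out = replicate_alt items chunksize
instance (items : List Int) (chunksize : Int) (out : List (List Int)) : Decidable (Spec_replicate items chunksize out) := by unfold Spec_replicate; infer_instance

-- ===== CLAIM (what is proved, stated in full; the proofs are below) =====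
def Claim_equal_replicate : Prop := ∀ (items : List Int) (chunksize : Int), Dom_replicate items chunksize → Spec_replicate items chunksize (replicate items chunksize)

-- ===== LEMMAS AND PROOFS =====

theorem loopB_eq_goA (m : Nat) (items : List Int) : ∀ buf : List Int,
    buf.length < m + 1 → loopB (m + 1) items buf = goA m (buf ++ items) := by
  induction items with
  | nil =>
    intro buf hb
    cases buf with
    | nil => simp only [List.nil_append]; rw [loopB, goA]; simp
    | cons b bs =>
      have htake : (b :: bs).take (m + 1) = b :: bs :=
        List.take_of_length_le (Nat.le_of_lt hb)
      have hdrop : (b :: bs).drop (m + 1) = [] :=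
        List.drop_of_length_le (Nat.le_of_lt hb)
      have hlen : ((b :: bs).take (m + 1)).length ≠ m + 1 := by
        rw [htake]; simp only [List.length_cons] at hb ⊢; omega
      rw [List.append_nil, loopB, goA]
      simp only [htake, hdrop, goA]
      simp
      simp only [List.length_cons] at hb
      omega
  | cons x xs ih =>
    intro buf hb
    rw [loopB]
    by_cases h : (buf ++ [x]).length = m + 1
    · have hlen : buf.length = m := by simpa using h
      have htake : ((buf ++ x :: xs).take (m + 1)) = buf ++ [x] := by
        rw [List.take_append, List.take_of_length_le (by omega)]
        simp [hlen]
      have hdrop : ((buf ++ x :: xs).drop (m + 1)) = xs := by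
        rw [List.drop_append, List.drop_of_length_le (by omega)]
        simp [hlen]
      obtain ⟨y, ys, hba⟩ : ∃ y ys, buf ++ x :: xs = y :: ys := by
        cases hh : buf ++ x :: xs with
        | nil => simp at hh
        | cons y ys => exact ⟨y, ys, rfl⟩
      rw [if_pos h, hba, goA, ← hba, htake, hdrop, if_pos (by simpa using h),
        ih [] (by simp)]
      simp
    · have hb' : (buf ++ [x]).length < m + 1 := by
        simp only [List.length_append, List.length_cons, List.length_nil] at h ⊢
        omega
      rw [if_neg h, ih (buf ++ [x]) hb']
      simp

-- ===== VERDICT (by name: the statement is the Claim_ definition above) =====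
theorem replicate_spec : Claim_equal_replicate := by
  intro items chunksize _
  unfold Spec_replicate replicate replicate_alt
  by_cases h : chunksize ≤ 0
  · rw [if_pos h, if_pos (by omega)]
  · have h1 : ¬ chunksize < 1 := by omega
    have hn : chunksize.toNat = (chunksize.toNat - 1) + 1 := by omega
    rw [if_neg h, if_neg h1, hn, loopB_eq_goA (chunksize.toNat - 1) items [] (by simp)]
    simp
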